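-- pv_equiv track=rewrite | github.com/PermutaTriangle/Permuta | permuta/misc/iterable_floor_and_ceiling.py | left_floor_and_ceiling
-- ===== SOURCE A (Python) =====
-- import collections
--
-- FloorAndCeiling = collections.namedtuple("FloorAndCeiling",
--                                          ["floor", "ceiling"])
--
-- def left_floor_and_ceiling(iterable, default_floor=None, default_ceiling=None):
--     """Find the left floor and ceiling indices of iterable.
--
--     Define left_floor of an element in a sequence to be the index of the
--     greatest smaller element to the left of said element, or default_floor
--     if there is none. Similarly define default_ceiling. This function yields
--     a tuple (left_floor, left_ceiling) for each element of iterable.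
--
--     Args:
--         iterable: <iterable>
--             An iterable of totally ordered unique elements.
--         default_floor: <object>
--         default_ceiling: <object>
--
--     Yields: (int, int)
--         The i-th yielded tuple is the left floor and ceiling indices of
--         the i-th element of the iterable. The tuples are named tuples
--         with floor and ceiling attributes.
--     """
--     # TODO: Define behaviour for duplicate elements
--     dq = collections.deque()
--     smallest = None
--     biggest = None
--     index = 0
--     for element in iterable:
--         if index == 0:
--             dq.append((element, index))
--             smallest = element
--             biggest = element
--             yield FloorAndCeiling(default_floor, default_ceiling)
--         else:
--             if element <= smallest:
--                 # Rotate until smallest element is at front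
--                 while dq[0][0] != smallest:
--                     dq.rotate(-1)
--                 yield FloorAndCeiling(default_floor, dq[0][1])
--                 dq.appendleft((element, index))
--                 smallest = element
--             elif element >= biggest:
--                 # Rotate until biggest element is at end
--                 while dq[-1][0] != biggest:
--                     dq.rotate(-1)
--                 yield FloorAndCeiling(dq[-1][1], default_ceiling)
--                 dq.append((element, index))
--                 biggest = element
--             else:
--                 while not dq[-1][0] <= element <= dq[0][0]:
--                     dq.rotate()
--                 yield FloorAndCeiling(dq[-1][1], dq[0][1])
--                 dq.appendleft((element, index))
--         index += 1
-- ===== SOURCE B (Python) =====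
-- def _bisect_left(seen, x):
--     """Leftmost insertion point of x in seen (a list of (value, index) pairs
--     sorted by value), hand-rolled binary search."""
--     lo, hi = 0, len(seen)
--     while lo < hi:
--         mid = (lo + hi) // 2
--         if seen[mid][0] < x:
--             lo = mid + 1
--         else:
--             hi = mid
--     return lo
--
--
-- def left_floor_and_ceiling(iterable, default_floor=None, default_ceiling=None):
--     """Sorted insertion list + binary search instead of the rotating deque:
--     keep the (value, index) pairs seen so far sorted by value; the predecessor
--     and successor of each new element are the neighbours of its insertion point."""
--     seen = []
--     for i, element in enumerate(iterable):
--         pos = _bisect_left(seen, element)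
--         floor = seen[pos - 1][1] if pos > 0 else default_floor
--         ceiling = seen[pos][1] if pos < len(seen) else default_ceiling
--         yield (floor, ceiling)
--         seen.insert(pos, (element, i))
-- ===== Notes on version B (the rewrite author's own statement) =====
-- stated objective: alternative
-- what changed: Replaces A's rotating deque (which linearly rotates the whole deque to find each element's neighbours) by a list of (value, index) pairs kept sorted by value, with a hand-rolled binary search locating the insertion point whose two neighbours are the floor and ceiling.
import Mathlib
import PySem

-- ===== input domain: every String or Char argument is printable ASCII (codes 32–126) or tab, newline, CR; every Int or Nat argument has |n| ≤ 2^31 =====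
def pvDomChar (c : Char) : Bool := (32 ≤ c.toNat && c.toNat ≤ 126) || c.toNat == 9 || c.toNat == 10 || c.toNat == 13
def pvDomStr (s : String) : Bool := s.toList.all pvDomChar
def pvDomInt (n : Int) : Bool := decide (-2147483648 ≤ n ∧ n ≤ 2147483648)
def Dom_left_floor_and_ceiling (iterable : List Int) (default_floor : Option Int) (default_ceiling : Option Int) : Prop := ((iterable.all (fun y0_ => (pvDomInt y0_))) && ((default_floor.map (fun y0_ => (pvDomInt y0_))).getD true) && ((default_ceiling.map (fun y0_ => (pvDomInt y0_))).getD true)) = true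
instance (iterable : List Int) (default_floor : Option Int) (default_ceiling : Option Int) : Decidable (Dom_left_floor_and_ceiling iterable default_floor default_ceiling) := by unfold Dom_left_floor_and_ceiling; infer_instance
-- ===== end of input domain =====

-- B replaces A's rotating deque by a sorted (value, index) list with a hand-rolled binary
-- search (objective: alternative algorithm). Both Pythons are generators; the equivalence
-- is about the list of yielded (floor, ceiling) pairs.

-- ===== PORT A =====
-- The deque is a List (Int × Int), front = head.  Python's dq.rotate(-1) moves the front
-- to the back (= List.rotate 1); dq.rotate() moves the back to the front
-- (= List.rotate (length - 1)).  Each 'while ... rotate' loop of A performs at most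
-- dq.length - 1 rotations whenever it terminates, so it is ported with fuel dq.length
-- (when the fuel runs out the deque is returned as is; on the inputs admitted by
-- Pre_ the stop condition is always reached within the fuel).
def pvRotUntil (stop : List (Int × Int) → Bool) (rot : List (Int × Int) → List (Int × Int)) :
    Nat → List (Int × Int) → List (Int × Int)
  | 0, d => d
  | fuel + 1, d => if stop d then d else pvRotUntil stop rot fuel (rot d)

-- dq[0] / dq[-1] are read via headD/getLastD: in A they are only read when the deque is
-- nonempty (index > 0), so the default is never the value used.  smallest/biggest start
-- as Python's None; they are first read only after the index == 0 iteration assigned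
-- them, so they are carried as Int with a dummy initial 0.
def pvLoopA (df dc : Option Int) : List Int → List (Int × Int) → Int → Int → Int →
    List (Option Int × Option Int) → List (Option Int × Option Int)
  | [], _, _, _, _, out => out
  | e :: rest, dq, smallest, biggest, index, out =>
    if index == 0 then
      pvLoopA df dc rest (dq ++ [(e, index)]) e e (index + 1) (out ++ [(df, dc)])
    else if e ≤ smallest then
      let dq' := pvRotUntil (fun d => (d.headD (0, 0)).1 == smallest) (fun d => d.rotate 1) dq.length dq
      pvLoopA df dc rest ((e, index) :: dq') e biggest (index + 1)
        (out ++ [(df, some (dq'.headD (0, 0)).2)])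
    else if e ≥ biggest then
      let dq' := pvRotUntil (fun d => (d.getLastD (0, 0)).1 == biggest) (fun d => d.rotate 1) dq.length dq
      pvLoopA df dc rest (dq' ++ [(e, index)]) smallest e (index + 1)
        (out ++ [(some (dq'.getLastD (0, 0)).2, dc)])
    else
      let dq' := pvRotUntil
        (fun d => decide ((d.getLastD (0, 0)).1 ≤ e) && decide (e ≤ (d.headD (0, 0)).1))
        (fun d => d.rotate (d.length - 1)) dq.length dq
      pvLoopA df dc rest ((e, index) :: dq') smallest biggest (index + 1)
        (out ++ [(some (dq'.getLastD (0, 0)).2, some (dq'.headD (0, 0)).2)])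

def left_floor_and_ceiling (iterable : List Int) (default_floor : Option Int) (default_ceiling : Option Int) : List (Option Int × Option Int) :=
  pvLoopA default_floor default_ceiling iterable [] 0 0 0 []

-- ===== PORT B =====
-- Source B's hand-rolled binary-search while loop; each iteration shrinks hi - lo by at
-- least 1, so fuel hi - lo (= seen.length at the call site) covers every iteration and
-- the loop exits with lo = hi exactly as in Python.  seen[mid] is read via getD: mid is
-- in range whenever lo < hi ≤ seen.length, which holds at every call the port makes.
def pvBisectLoop (seen : List (Int × Int)) (x : Int) : Nat → Nat → Nat → Nat
  | 0, lo, _ => lo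
  | fuel + 1, lo, hi =>
    if lo < hi then
      if (seen.getD ((lo + hi) / 2) (0, 0)).1 < x then pvBisectLoop seen x fuel ((lo + hi) / 2 + 1) hi
      else pvBisectLoop seen x fuel lo ((lo + hi) / 2)
    else lo

def pvBisectLeft (seen : List (Int × Int)) (x : Int) : Nat :=
  pvBisectLoop seen x seen.length 0 seen.length

-- Python's enumerate(iterable), counter carried explicitly.
def pvEnum : Int → List Int → List (Int × Int)
  | _, [] => []
  | i, e :: rest => (i, e) :: pvEnum (i + 1) rest

-- seen.insert(pos, (element, i)) with 0 ≤ pos ≤ len(seen) (always the case for a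
-- bisect result) is List.insertIdx pos.
def pvLoopB (df dc : Option Int) : List (Int × Int) → List (Int × Int) →
    List (Option Int × Option Int) → List (Option Int × Option Int)
  | [], _, out => out
  | (i, e) :: rest, seen, out =>
    let pos := pvBisectLeft seen e
    let floor := if 0 < pos then some ((seen.getD (pos - 1) (0, 0)).2) else df
    let ceiling := if pos < seen.length then some ((seen.getD pos (0, 0)).2) else dc
    pvLoopB df dc rest (seen.insertIdx pos (e, i)) (out ++ [(floor, ceiling)])

def left_floor_and_ceiling_alt (iterable : List Int) (default_floor : Option Int) (default_ceiling : Option Int) : List (Option Int × Option Int) :=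
  pvLoopB default_floor default_ceiling (pvEnum 0 iterable) [] []

-- ===== PRECONDITION & SPEC =====
-- Pre_ excludes iterables with duplicate elements: A's docstring requires "totally
-- ordered unique elements" and carries "TODO: Define behaviour for duplicate elements";
-- which index A reports for equal elements is an accident of its deque rotation and is
-- as defensible as B's choice.
def Pre_left_floor_and_ceiling (iterable : List Int) (default_floor : Option Int) (default_ceiling : Option Int) : Prop :=
  iterable.Pairwise (· ≠ ·)
instance (iterable : List Int) (default_floor : Option Int) (default_ceiling : Option Int) : Decidable (Pre_left_floor_and_ceiling iterable default_floor default_ceiling) := by unfold Pre_left_floor_and_ceiling; infer_instance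

def pvWitness_left_floor_and_ceiling : List Int × Option Int × Option Int := ([2, 0, 1], some (-7), none)

def Spec_left_floor_and_ceiling (iterable : List Int) (default_floor : Option Int) (default_ceiling : Option Int) (out : List (Option Int × Option Int)) : Prop := out = left_floor_and_ceiling_alt iterable default_floor default_ceiling
instance (iterable : List Int) (default_floor : Option Int) (default_ceiling : Option Int) (out : List (Option Int × Option Int)) : Decidable (Spec_left_floor_and_ceiling iterable default_floor default_ceiling out) := by unfold Spec_left_floor_and_ceiling; infer_instance

-- ===== CLAIM (what is proved, stated in full; the proofs are below) =====
def Claim_equal_left_floor_and_ceiling : Prop := ∀ (iterable : List Int) (default_floor : Option Int) (default_ceiling : Option Int), Dom_left_floor_and_ceiling iterable default_floor default_ceiling → Pre_left_floor_and_ceiling iterable default_floor default_ceiling → Spec_left_floor_and_ceiling iterable default_floor default_ceiling (left_floor_and_ceiling iterable default_floor default_ceiling)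

-- ===== LEMMAS AND PROOFS =====

lemma pv_headD (l : List (Int × Int)) (h : 0 < l.length) (d : Int × Int) :
    l.headD d = l[0] := by
  cases l with
  | nil => simp at h
  | cons a t => rfl

lemma pv_lastD (l : List (Int × Int)) (h : 0 < l.length) (d : Int × Int) :
    l.getLastD d = l[l.length - 1]'(by omega) := by
  rw [List.getLastD_eq_getLast?, List.getLast?_eq_getElem?,
    List.getElem?_eq_getElem (by omega)]
  rfl

lemma pv_insertIdx_decomp : ∀ (n : Nat) (l : List (Int × Int)), n ≤ l.length →
    ∀ x, l.insertIdx n x = l.take n ++ x :: l.drop n := by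
  intro n
  induction n with
  | zero => intro l _ x; simp
  | succ m ih =>
    intro l hl x
    cases l with
    | nil => simp at hl
    | cons a t =>
      simp only [List.insertIdx_succ_cons, List.take_succ_cons, List.drop_succ_cons,
        List.cons_append]
      rw [ih t (by simpa using hl) x]

lemma pv_rot_head (s : List (Int × Int)) (j : Nat) (h : j < s.length) (d : Int × Int) :
    (s.rotate j).headD d = s[j] := by
  have h0 : 0 < (s.rotate j).length := by rw [List.length_rotate]; omega
  rw [pv_headD _ h0, List.getElem_rotate]
  simp [Nat.mod_eq_of_lt h]

lemma pv_rot_last (s : List (Int × Int)) (j : Nat) (h : j < s.length) (d : Int × Int) :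
    (s.rotate j).getLastD d = s[(s.length - 1 + j) % s.length]'(Nat.mod_lt _ (by omega)) := by
  have h0 : 0 < (s.rotate j).length := by rw [List.length_rotate]; omega
  rw [pv_lastD _ h0, List.getElem_rotate]
  congr 1 <;> rw [List.length_rotate]

lemma pv_sorted_lt {s : List (Int × Int)} (hsort : s.Pairwise (fun p q => p.1 < q.1))
    {i j : Nat} (hi : i < s.length) (hj : j < s.length) (hij : i < j) :
    s[i].1 < s[j].1 :=
  List.pairwise_iff_getElem.mp hsort i j hi hj hij

lemma pv_bisect_loop_spec (s : List (Int × Int)) (x : Int)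
    (hsort : s.Pairwise (fun p q => p.1 < q.1)) :
    ∀ (fuel lo hi : Nat), lo ≤ hi → hi ≤ s.length → hi - lo ≤ fuel →
    (∀ i (_ : i < s.length), i < lo → s[i].1 < x) →
    (∀ i (_ : i < s.length), hi ≤ i → ¬ s[i].1 < x) →
    (∀ i (_ : i < s.length), i < pvBisectLoop s x fuel lo hi → s[i].1 < x) ∧
    (∀ i (_ : i < s.length), pvBisectLoop s x fuel lo hi ≤ i → ¬ s[i].1 < x) ∧
    pvBisectLoop s x fuel lo hi ≤ hi ∧ lo ≤ pvBisectLoop s x fuel lo hi := by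
  intro fuel
  induction fuel with
  | zero =>
    intro lo hi hlh hhs hf hlo hhi
    have : lo = hi := by omega
    subst this
    simp only [pvBisectLoop]
    exact ⟨hlo, fun i h hle => hhi i h hle, le_refl _, le_refl _⟩
  | succ fuel ih =>
    intro lo hi hlh hhs hf hlo hhi
    simp only [pvBisectLoop]
    by_cases hcmp : lo < hi
    · rw [if_pos hcmp]
      have hmid : (lo + hi) / 2 < s.length := by omega
      have hmlo : lo ≤ (lo + hi) / 2 := by omega
      have hmhi : (lo + hi) / 2 < hi := by omega
      rw [List.getD_eq_getElem _ _ hmid]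
      by_cases hv : (s[(lo + hi) / 2]).1 < x
      · rw [if_pos hv]
        have h1 : ∀ i (_ : i < s.length), i < (lo + hi) / 2 + 1 → s[i].1 < x := by
          intro i hi' hil
          rcases Nat.lt_or_ge i ((lo + hi) / 2) with h | h
          · exact lt_trans (pv_sorted_lt hsort hi' hmid h) hv
          · have : i = (lo + hi) / 2 := by omega
            subst this; exact hv
        have h2 := ih ((lo + hi) / 2 + 1) hi (by omega) hhs (by omega) h1 hhi
        exact ⟨h2.1, h2.2.1, h2.2.2.1, by omega⟩
      · rw [if_neg hv]
        have h1 : ∀ i (_ : i < s.length), (lo + hi) / 2 ≤ i → ¬ s[i].1 < x := by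
          intro i hi' hil hxi
          rcases Nat.lt_or_ge ((lo + hi) / 2) i with h | h
          · exact hv (lt_trans (pv_sorted_lt hsort hmid hi' h) hxi)
          · have : i = (lo + hi) / 2 := by omega
            subst this; exact hv hxi
        have h2 := ih lo ((lo + hi) / 2) (by omega) (by omega) (by omega) hlo h1
        refine ⟨h2.1, fun i h hle => ?_, by omega, h2.2.2.2⟩
        rcases Nat.lt_or_ge i ((lo + hi) / 2) with hc | hc
        · exact h2.2.1 i h hle
        · exact h1 i h hc
    · rw [if_neg hcmp]
      have : lo = hi := by omega
      subst this
      exact ⟨hlo, fun i h hle => hhi i h hle, le_refl _, le_refl _⟩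

lemma pv_bisect_spec (s : List (Int × Int)) (x : Int)
    (hsort : s.Pairwise (fun p q => p.1 < q.1)) :
    (∀ i (_ : i < s.length), i < pvBisectLeft s x → s[i].1 < x) ∧
    (∀ i (_ : i < s.length), pvBisectLeft s x ≤ i → ¬ s[i].1 < x) ∧
    pvBisectLeft s x ≤ s.length := by
  have h := pv_bisect_loop_spec s x hsort s.length 0 s.length (by omega) (by omega)
    (by omega) (by intro i _ hi0; omega) (by intro i hi hle; omega)
  exact ⟨h.1, h.2.1, h.2.2.1⟩

-- A's first while loop: from any rotation of the strictly sorted deque s, rotating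
-- front-to-back until the front value equals s's minimum recovers s itself.
lemma pv_mod_pred (len j : Nat) (h1 : 1 ≤ j) (h : j < len) :
    (len - 1 + j) % len = j - 1 := by
  have he : len - 1 + j = len + (j - 1) := by omega
  rw [he, Nat.add_mod_left, Nat.mod_eq_of_lt (by omega)]

lemma pv_rot_last' (s : List (Int × Int)) (j k : Nat) (hj : j < s.length)
    (hk : k < s.length) (heq : (s.length - 1 + j) % s.length = k) (d : Int × Int) :
    (s.rotate j).getLastD d = s[k] := by
  subst heq
  exact pv_rot_last s j hj d

lemma pv_rot_min (s : List (Int × Int)) (hs : 0 < s.length)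
    (hsort : s.Pairwise (fun p q => p.1 < q.1)) :
    ∀ (fuel j : Nat), j ≤ s.length → s.length ≤ fuel + j →
    pvRotUntil (fun d => (d.headD (0, 0)).1 == (s[0]'hs).1) (fun d => d.rotate 1)
      fuel (s.rotate j) = s := by
  intro fuel
  induction fuel with
  | zero =>
    intro j hj hf
    have : j = s.length := by omega
    subst this
    simp only [pvRotUntil, List.rotate_length]
  | succ fuel ih =>
    intro j hj hf
    rcases Nat.lt_or_ge j s.length with hjlt | hjge
    · simp only [pvRotUntil]
      rw [pv_rot_head s j hjlt]
      by_cases hj0 : j = 0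
      · subst hj0
        simp [List.rotate_zero]
      · have hne : (s[j]'hjlt).1 ≠ (s[0]'hs).1 :=
          ne_of_gt (pv_sorted_lt hsort hs hjlt (by omega))
        rw [if_neg (by simp [hne]), List.rotate_rotate]
        exact ih (j + 1) (by omega) (by omega)
    · have : j = s.length := by omega
      subst this
      simp only [pvRotUntil, List.rotate_length]
      rw [pv_headD s hs]
      simp

-- A's second while loop: rotating front-to-back until the back value equals s's maximum.
lemma pv_rot_max (s : List (Int × Int)) (hs : 0 < s.length)
    (hsort : s.Pairwise (fun p q => p.1 < q.1)) :
    ∀ (fuel j : Nat), j ≤ s.length → s.length ≤ fuel + j →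
    pvRotUntil (fun d => (d.getLastD (0, 0)).1 == (s[s.length - 1]'(by omega)).1)
      (fun d => d.rotate 1) fuel (s.rotate j) = s := by
  intro fuel
  induction fuel with
  | zero =>
    intro j hj hf
    have : j = s.length := by omega
    subst this
    simp only [pvRotUntil, List.rotate_length]
  | succ fuel ih =>
    intro j hj hf
    rcases Nat.lt_or_ge j s.length with hjlt | hjge
    · simp only [pvRotUntil]
      by_cases hj0 : j = 0
      · subst hj0
        rw [pv_rot_last' s 0 (s.length - 1) hjlt (by omega)
          (by rw [Nat.add_zero, Nat.mod_eq_of_lt (by omega)])]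
        simp [List.rotate_zero]
      · rw [pv_rot_last' s j (j - 1) hjlt (by omega) (pv_mod_pred _ _ (by omega) hjlt)]
        have hne : (s[j - 1]'(by omega)).1 ≠ (s[s.length - 1]'(by omega)).1 :=
          ne_of_lt (pv_sorted_lt hsort (by omega) (by omega) (by omega))
        rw [if_neg (by simp [hne]), List.rotate_rotate]
        exact ih (j + 1) (by omega) (by omega)
    · have : j = s.length := by omega
      subst this
      simp only [pvRotUntil, List.rotate_length]
      rw [pv_lastD s hs]
      simp

-- A's third while loop: rotating back-to-front until the element fits between back and
-- front lands on the rotation that splits s at the insertion point pos.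
lemma pv_rot_mid (s : List (Int × Int)) (hsort : s.Pairwise (fun p q => p.1 < q.1))
    (x : Int) (pos : Nat) (hp0 : 0 < pos) (hpl : pos < s.length)
    (hlo : (s[pos - 1]'(by omega)).1 < x) (hhi : x < (s[pos]'hpl).1) :
    ∀ (fuel j : Nat) (_ : j < s.length),
    (if pos ≤ j then j - pos else j + s.length - pos) ≤ fuel →
    pvRotUntil (fun d => decide ((d.getLastD (0, 0)).1 ≤ x) && decide (x ≤ (d.headD (0, 0)).1))
      (fun d => d.rotate (d.length - 1)) fuel (s.rotate j) = s.rotate pos := by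
  intro fuel
  induction fuel with
  | zero =>
    intro j hj hm
    have : j = pos := by
      by_cases h : pos ≤ j
      · simp [h] at hm; omega
      · simp [h] at hm; omega
    subst this
    simp only [pvRotUntil]
  | succ fuel ih =>
    intro j hj hm
    simp only [pvRotUntil]
    by_cases hjp : j = pos
    · subst hjp
      rw [pv_rot_last' s j (j - 1) hj (by omega) (pv_mod_pred _ _ (by omega) hj),
        pv_rot_head s j hj]
      rw [if_pos (by simp only [Bool.and_eq_true, decide_eq_true_eq]; exact ⟨le_of_lt hlo, le_of_lt hhi⟩)]
    · have hstop : (decide ((((s.rotate j).getLastD (0, 0)).1 ≤ x)) &&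
          decide (x ≤ ((s.rotate j).headD (0, 0)).1)) = false := by
        by_cases hj0 : j = 0
        · subst hj0
          rw [pv_rot_head s 0 (by omega)]
          have hle : (s[0]'(by omega)).1 ≤ (s[pos - 1]'(by omega)).1 := by
            rcases Nat.eq_or_lt_of_le (Nat.one_le_iff_ne_zero.mpr (by omega) : 1 ≤ pos) with h | h
            · have hpp : pos - 1 = 0 := by omega
              simp [hpp]
            · exact le_of_lt (pv_sorted_lt hsort (by omega) (by omega) (by omega))
          simp only [Bool.and_eq_false_iff, decide_eq_false_iff_not]
          right
          omega
        · rw [pv_rot_last' s j (j - 1) hj (by omega) (pv_mod_pred _ _ (by omega) hj),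
            pv_rot_head s j hj]
          simp only [Bool.and_eq_false_iff, decide_eq_false_iff_not]
          rcases Nat.lt_or_ge j pos with hc | hc
          · right
            have : (s[j]'hj).1 ≤ (s[pos - 1]'(by omega)).1 := by
              rcases Nat.eq_or_lt_of_le (by omega : j ≤ pos - 1) with h | h
              · subst h; exact le_refl _
              · exact le_of_lt (pv_sorted_lt hsort hj (by omega) h)
            omega
          · left
            have hc' : pos < j := by omega
            have : (s[pos]'hpl).1 ≤ (s[j - 1]'(by omega)).1 := by
              rcases Nat.eq_or_lt_of_le (by omega : pos ≤ j - 1) with h | h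
              · subst h; exact le_refl _
              · exact le_of_lt (pv_sorted_lt hsort hpl (by omega) h)
            omega
      rw [if_neg (by rw [hstop]; exact Bool.false_ne_true)]
      have hlen : (s.rotate j).length = s.length := List.length_rotate s j
      rw [hlen, List.rotate_rotate]
      by_cases hj0 : j = 0
      · subst hj0
        have he : s.rotate (0 + (s.length - 1)) = s.rotate (s.length - 1) := by
          rw [Nat.zero_add]
        rw [he]
        exact ih (s.length - 1) (by omega) (by
          have hple : pos ≤ s.length - 1 := by omega
          simp only [hple, if_pos]
          by_cases h : pos ≤ 0
          · omega
          · simp [h] at hm; omega)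
      · have he : s.rotate (j + (s.length - 1)) = s.rotate (j - 1) := by
          rw [← List.rotate_mod]
          congr 1
          have : j + (s.length - 1) = s.length + (j - 1) := by omega
          rw [this, Nat.add_mod_left, Nat.mod_eq_of_lt (by omega)]
        rw [he]
        exact ih (j - 1) (by omega) (by
          by_cases h : pos ≤ j
          · have h1 : pos ≤ j - 1 := by omega
            simp only [h, if_pos] at hm
            simp only [h1, if_pos]
            omega
          · by_cases h1 : pos ≤ j - 1
            · omega
            · simp only [h, h1] at hm ⊢
              simp at hm ⊢
              omega)

lemma pv_getElem_congr (s : List (Int × Int)) {i j : Nat} (h : i = j) (hi : i < s.length) :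
    s[i] = s[j]'(h ▸ hi) := by subst h; rfl

lemma pv_lastD_cons (p : Int × Int) (s : List (Int × Int)) (hs : 0 < s.length) (d : Int × Int) :
    (p :: s).getLastD d = s.getLastD d := by
  cases s with
  | nil => simp at hs
  | cons q t => rfl

lemma pv_headD_append (l1 l2 : List (Int × Int)) (h : 0 < l1.length) (d : Int × Int) :
    (l1 ++ l2).headD d = l1.headD d := by
  cases l1 with
  | nil => simp at h
  | cons p t => rfl

lemma pv_lastD_append (l1 l2 : List (Int × Int)) (h : 0 < l2.length) (d : Int × Int) :
    (l1 ++ l2).getLastD d = l2.getLastD d := by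
  induction l1 with
  | nil => rfl
  | cons p t ih =>
    rw [List.cons_append, pv_lastD_cons _ _ (by simp; omega) d, ih]

lemma pv_headD_take (s : List (Int × Int)) (pos : Nat) (h0 : 0 < pos) (d : Int × Int) :
    (s.take pos).headD d = s.headD d := by
  cases s with
  | nil => simp
  | cons a t =>
    cases pos with
    | zero => omega
    | succ n => rfl

lemma pv_drop_lastD (s : List (Int × Int)) (pos : Nat) (h : pos < s.length) (d : Int × Int) :
    (s.drop pos).getLastD d = s.getLastD d := by
  have h1 : 0 < (s.drop pos).length := by simp; omega
  have h2 : ((s.drop pos)[(s.drop pos).length - 1]'(by omega)) =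
      s[pos + ((s.drop pos).length - 1)]'(by simp; omega) := by
    rw [List.getElem_drop]
  rw [pv_lastD _ h1 d, pv_lastD s (by omega) d, h2,
    pv_getElem_congr s (i := pos + ((s.drop pos).length - 1)) (j := s.length - 1)
      (by simp; omega)]

-- The simulation: A's state is a rotation (by some j) of B's sorted list s of
-- (value, index) pairs; smallest/biggest are s's first/last values.
lemma pv_loop_eq (df dc : Option Int) :
    ∀ (rest : List Int) (s : List (Int × Int)) (j : Nat) (idx : Int)
      (out : List (Option Int × Option Int)) (hs : 0 < s.length) (hj : j < s.length)
      (hsort : s.Pairwise (fun p q => p.1 < q.1))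
      (hfresh : ∀ e ∈ rest, ∀ p ∈ s, e ≠ p.1)
      (hdist : rest.Pairwise (· ≠ ·)) (hidx : 0 < idx),
    pvLoopA df dc rest (s.rotate j) ((s.headD (0, 0)).1) ((s.getLastD (0, 0)).1) idx out
      = pvLoopB df dc (pvEnum idx rest) s out := by
  intro rest
  induction rest with
  | nil => intro s j idx out _ _ _ _ _ _; rfl
  | cons e rest ih =>
    intro s j idx out hs hj hsort hfresh hdist hidx
    obtain ⟨hb1, hb2, hb3⟩ := pv_bisect_spec s e hsort
    have hfe : ∀ p ∈ s, e ≠ p.1 := hfresh e (List.mem_cons_self ..)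
    have hb2' : ∀ i (h : i < s.length), pvBisectLeft s e ≤ i → e < s[i].1 := by
      intro i h hle
      rcases lt_trichotomy e (s[i].1) with hc | hc | hc
      · exact hc
      · exact absurd hc (hfe s[i] (List.getElem_mem h))
      · exact absurd hc (hb2 i h hle)
    have hsm : (s.headD (0, 0)).1 = (s[0]'hs).1 := by rw [pv_headD s hs]
    have hbg : (s.getLastD (0, 0)).1 = (s[s.length - 1]'(by omega)).1 := by
      rw [pv_lastD s hs]
    have hfresh' : ∀ a ∈ rest, ∀ p ∈ s, a ≠ p.1 :=
      fun a ha p hp => hfresh a (List.mem_cons_of_mem _ ha) p hp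
    have hdist' : rest.Pairwise (· ≠ ·) := (List.pairwise_cons.mp hdist).2
    have hed : ∀ a ∈ rest, e ≠ a := (List.pairwise_cons.mp hdist).1
    simp only [pvEnum, pvLoopB, pvLoopA]
    rw [if_neg (by simp only [beq_iff_eq]; omega)]
    rw [List.length_rotate]
    by_cases hcase1 : e ≤ (s.headD (0, 0)).1
    · -- e goes to the front: pos = 0
      rw [if_pos hcase1]
      have hpos : pvBisectLeft s e = 0 := by
        by_contra hne
        have h0 : (s[0]'hs).1 < e := hb1 0 hs (by omega)
        rw [hsm] at hcase1; omega
      rw [hsm, pv_rot_min s hs hsort s.length j (by omega) (by omega)]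
      rw [hpos]
      rw [if_neg (by omega), if_pos hs]
      rw [List.getD_eq_getElem _ _ hs, List.insertIdx_zero, ← pv_headD s hs (0, 0)]
      have hsort2 : ((e, idx) :: s).Pairwise (fun p q : Int × Int => p.1 < q.1) := by
        rw [List.pairwise_cons]
        refine ⟨fun q hq => ?_, hsort⟩
        obtain ⟨i, hilt, hqe⟩ := List.mem_iff_getElem.mp hq
        rw [← hqe]
        exact hb2' i hilt (by omega)
      have := ih ((e, idx) :: s) 0 (idx + 1) (out ++ [(df, some ((s.headD (0, 0)).2))])
        (by simp) (by simp) hsort2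
        (by intro a ha p hp
            rcases List.mem_cons.mp hp with h | h
            · rw [h]; exact fun hc => (hed a ha) hc.symm
            · exact hfresh' a ha p h)
        hdist' (by omega)
      rw [List.rotate_zero] at this
      have hlast2 : (((e, idx) :: s).getLastD (0, 0)) = s.getLastD (0, 0) :=
        pv_lastD_cons _ _ hs _
      rw [hlast2] at this
      exact this
    · rw [if_neg hcase1]
      by_cases hcase2 : e ≥ (s.getLastD (0, 0)).1
      · -- e goes to the back: pos = s.length
        rw [if_pos hcase2]
        have hbl : (s[s.length - 1]'(by omega)).1 < e := by
          rcases lt_trichotomy (s[s.length - 1]'(by omega)).1 e with hc | hc | hc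
          · exact hc
          · exact absurd hc.symm (hfe _ (List.getElem_mem _))
          · rw [hbg] at hcase2; omega
        have hpos : pvBisectLeft s e = s.length := by
          rcases Nat.eq_or_lt_of_le hb3 with h | h
          · exact h
          · exfalso
            have := hb2' (pvBisectLeft s e) h (le_refl _)
            have hle : (s[pvBisectLeft s e]'h).1 ≤ (s[s.length - 1]'(by omega)).1 := by
              rcases Nat.eq_or_lt_of_le (by omega : pvBisectLeft s e ≤ s.length - 1) with hh | hh
              · rw [pv_getElem_congr s hh]
              · exact le_of_lt (pv_sorted_lt hsort h (by omega) hh)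
            omega
        rw [hbg, pv_rot_max s hs hsort s.length j (by omega) (by omega)]
        rw [hpos]
        rw [if_pos (by omega), if_neg (by omega)]
        rw [List.getD_eq_getElem _ _ (by omega : s.length - 1 < s.length),
          ← pv_lastD s hs (0, 0)]
        have hdecomp : s.insertIdx s.length (e, idx) = s ++ [(e, idx)] :=
          List.insertIdx_length_self
        rw [hdecomp]
        have hsort2 : (s ++ [(e, idx)]).Pairwise (fun p q : Int × Int => p.1 < q.1) := by
          rw [List.pairwise_append]
          refine ⟨hsort, List.pairwise_singleton .., fun a ha b hb => ?_⟩
          rw [List.mem_singleton.mp hb]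
          obtain ⟨i, hilt, hae⟩ := List.mem_iff_getElem.mp ha
          rw [← hae]
          exact hb1 i hilt (by omega)
        have := ih (s ++ [(e, idx)]) 0 (idx + 1) (out ++ [(some ((s.getLastD (0, 0)).2), dc)])
          (by simp) (by simp) hsort2
          (by intro a ha p hp
              rcases List.mem_append.mp hp with h | h
              · exact hfresh' a ha p h
              · rw [List.mem_singleton.mp h]; exact fun hc => (hed a ha) hc.symm)
          hdist' (by omega)
        rw [List.rotate_zero] at this
        rw [pv_headD_append s [(e, idx)] hs, List.getLastD_concat] at this
        exact this
      · -- e goes strictly inside: 0 < pos < s.length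
        rw [if_neg hcase2]
        have hsme : (s[0]'hs).1 < e := by
          rcases lt_trichotomy (s[0]'hs).1 e with hc | hc | hc
          · exact hc
          · exact absurd hc.symm (hfe _ (List.getElem_mem _))
          · rw [hsm] at hcase1; omega
        have hbge : e < (s[s.length - 1]'(by omega)).1 := by
          rw [hbg] at hcase2; omega
        have hpos0 : 0 < pvBisectLeft s e := by
          by_contra h
          have := hb2' 0 hs (by omega)
          omega
        have hposl : pvBisectLeft s e < s.length := by
          rcases Nat.eq_or_lt_of_le hb3 with h | h
          · exfalso
            have := hb1 (s.length - 1) (by omega) (by omega)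
            omega
          · exact h
        set pos := pvBisectLeft s e with hposdef
        have hbrlo : (s[pos - 1]'(by omega)).1 < e := hb1 (pos - 1) (by omega) (by omega)
        have hbrhi : e < (s[pos]'hposl).1 := hb2' pos hposl (le_refl _)
        rw [pv_rot_mid s hsort e pos hpos0 hposl hbrlo hbrhi s.length j hj
          (by by_cases h : pos ≤ j
              · simp only [h, if_pos]; omega
              · simp only [h]; simp; omega)]
        rw [pv_rot_last' s pos (pos - 1) hposl (by omega) (pv_mod_pred _ _ (by omega) hposl),
          pv_rot_head s pos hposl]
        rw [if_pos hpos0, if_pos hposl]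
        rw [List.getD_eq_getElem _ _ (by omega : pos - 1 < s.length),
          List.getD_eq_getElem _ _ hposl]
        have hdecomp : s.insertIdx pos (e, idx) = s.take pos ++ (e, idx) :: s.drop pos :=
          pv_insertIdx_decomp pos s (by omega) (e, idx)
        have hlen2 : (s.insertIdx pos (e, idx)).length = s.length + 1 := by
          rw [List.length_insertIdx]; simp [Nat.le_of_lt hposl]
        have htl : (s.take pos).length = pos := List.length_take_of_le (by omega)
        have hrot : (s.take pos ++ (e, idx) :: s.drop pos).rotate pos = (e, idx) :: s.rotate pos := by
          rw [List.rotate_eq_drop_append_take (by simp; omega),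
            List.drop_left' htl, List.take_left' htl, List.cons_append,
            List.rotate_eq_drop_append_take (le_of_lt hposl)]
        have hhead : (s.take pos ++ (e, idx) :: s.drop pos).headD (0, 0) = s.headD (0, 0) := by
          rw [pv_headD_append _ _ (by rw [htl]; omega), pv_headD_take s pos hpos0]
        have hlast : (s.take pos ++ (e, idx) :: s.drop pos).getLastD (0, 0) = s.getLastD (0, 0) := by
          rw [pv_lastD_append _ _ (by simp), pv_lastD_cons _ _ (by simp; omega),
            pv_drop_lastD s pos hposl]
        have hsort2 : (s.take pos ++ (e, idx) :: s.drop pos).Pairwise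
            (fun p q : Int × Int => p.1 < q.1) := by
          rw [List.pairwise_append]
          refine ⟨List.Pairwise.sublist (List.take_sublist _ _) hsort, ?_, ?_⟩
          · rw [List.pairwise_cons]
            refine ⟨fun q hq => ?_, List.Pairwise.sublist (List.drop_sublist _ _) hsort⟩
            obtain ⟨k, hk, hqe⟩ := List.mem_iff_getElem.mp hq
            have hk' : pos + k < s.length := by simp at hk; omega
            have hqe' : q = s[pos + k]'hk' := by rw [← hqe, List.getElem_drop]
            rw [hqe']
            exact hb2' (pos + k) hk' (by omega)
          · intro a ha b hb
            obtain ⟨i2, hi2, hae⟩ := List.mem_iff_getElem.mp ha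
            have hi2' : i2 < pos := by rw [htl] at hi2; exact hi2
            have hae' : a = s[i2]'(by omega) := by rw [← hae, List.getElem_take]
            rcases List.mem_cons.mp hb with hbe | hbd
            · rw [hbe, hae']
              exact hb1 i2 (by omega) hi2'
            · obtain ⟨k, hk, hbe⟩ := List.mem_iff_getElem.mp hbd
              have hk' : pos + k < s.length := by simp at hk; omega
              have hbe' : b = s[pos + k]'hk' := by rw [← hbe, List.getElem_drop]
              rw [hae', hbe']
              exact pv_sorted_lt hsort (by omega) hk' (by omega)
        have hfresh2 : ∀ a ∈ rest, ∀ p ∈ s.take pos ++ (e, idx) :: s.drop pos, a ≠ p.1 := by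
          intro a ha p hp
          rcases List.mem_append.mp hp with h | h
          · exact hfresh' a ha p ((List.take_sublist _ _).subset h)
          · rcases List.mem_cons.mp h with h' | h'
            · rw [h']; exact fun hc => (hed a ha) hc.symm
            · exact hfresh' a ha p ((List.drop_sublist _ _).subset h')
        have := ih (s.take pos ++ (e, idx) :: s.drop pos) pos (idx + 1)
          (out ++ [(some ((s[pos - 1]'(by omega)).2), some ((s[pos]'hposl).2))])
          (by simp) (by simp; omega) hsort2 hfresh2 hdist' (by omega)
        rw [hrot, hhead, hlast] at this
        rw [hdecomp]
        exact this

-- ===== VERDICT (by name: the statement is the Claim_ definition above) =====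
theorem left_floor_and_ceiling_spec : Claim_equal_left_floor_and_ceiling := by
  unfold Claim_equal_left_floor_and_ceiling
  intro iterable df dc _ hpre
  unfold Spec_left_floor_and_ceiling left_floor_and_ceiling left_floor_and_ceiling_alt
  unfold Pre_left_floor_and_ceiling at hpre
  cases iterable with
  | nil => rfl
  | cons e rest =>
    simp only [pvLoopA, pvEnum, pvLoopB, pvBisectLeft, pvBisectLoop, List.length_nil]
    rw [if_pos (by simp)]
    simp only [List.nil_append, List.insertIdx_zero, Nat.lt_irrefl, ite_false,
      zero_add, List.getD]
    have hfr : ∀ a ∈ rest, ∀ p ∈ [((e : Int), (0 : Int))], a ≠ p.1 := by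
      intro a ha p hp
      rw [List.mem_singleton.mp hp]
      exact fun hc => ((List.pairwise_cons.mp hpre).1 a ha) hc.symm
    have h := pv_loop_eq df dc rest [(e, 0)] 0 1 [(df, dc)] (by simp) (by simp)
      (List.pairwise_singleton ..) hfr (List.pairwise_cons.mp hpre).2 (by omega)
    rw [List.rotate_zero] at h
    simpa using h
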